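-- pv_equiv track=rewrite | github.com/BenQuigley/bevl_sheetify | main.py | find_status
-- ===== SOURCE A (Python) =====
-- def find_status(string):
--     statuses = ['C', 'I', 'N']
--     indeces = []
--     for s in statuses:
--         index = string.find('{})'.format(s))
--         if index >= 0:
--             indeces.append(index)
--     if indeces:
--         return min(indeces)
--     else:
--         return -1
-- ===== SOURCE B (Python) =====
-- def find_status(string):
--     i = 0
--     while i + 1 < len(string):
--         if string[i] in 'CIN' and string[i + 1] == ')':
--             return i
--         i += 1
--     return -1
-- ===== Notes on version B (the rewrite author's own statement) =====
-- stated objective: simpler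
-- what changed: Single left-to-right scan returning the first index whose character is one of the three status letters and is immediately followed by a closing parenthesis, instead of three independent find() scans collected into a list and reduced with min().
import Mathlib
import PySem

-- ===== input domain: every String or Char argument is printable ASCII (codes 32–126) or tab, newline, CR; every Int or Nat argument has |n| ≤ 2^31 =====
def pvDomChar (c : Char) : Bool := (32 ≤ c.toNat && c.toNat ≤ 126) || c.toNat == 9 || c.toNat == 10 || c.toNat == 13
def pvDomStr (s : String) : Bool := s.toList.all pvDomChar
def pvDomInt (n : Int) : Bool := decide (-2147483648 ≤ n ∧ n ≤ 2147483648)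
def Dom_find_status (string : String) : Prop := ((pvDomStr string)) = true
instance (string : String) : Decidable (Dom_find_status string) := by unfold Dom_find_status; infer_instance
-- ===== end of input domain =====

-- B replaces A's three independent find() scans plus min() by a single left-to-right scan
-- that returns the first index where a status pattern starts (objective: simpler).


-- ===== PORT A =====
def find_status (string : String) : Int :=
  let statuses : List Char := ['C', 'I', 'N']
  let indeces : List Int := statuses.foldl (fun acc s =>
    let index := PySem.Str.find string (String.ofList [s, ')'])
    if 0 ≤ index then acc ++ [index] else acc) []
  if indeces = [] then -1
  else (PySem.List.min? indeces (fun x => x)).getD (-1)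

-- ===== PORT B =====
def find_status_altGo : List Char → Nat → Int
  | c :: d :: t, i =>
      if (c = 'C' ∨ c = 'I' ∨ c = 'N') ∧ d = ')' then (i : Int)
      else find_status_altGo (d :: t) (i + 1)
  | _, _ => -1

def find_status_alt (string : String) : Int := find_status_altGo string.toList 0

-- ===== PRECONDITION & SPEC =====
def Spec_find_status (string : String) (out : Int) : Prop := out = find_status_alt string
instance (string : String) (out : Int) : Decidable (Spec_find_status string out) := by unfold Spec_find_status; infer_instance

-- ===== CLAIM (what is proved, stated in full; the proofs are below) =====
def Claim_equal_find_status : Prop := ∀ (string : String), Dom_find_status string → Spec_find_status string (find_status string)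

-- ===== LEMMAS AND PROOFS =====

/-- A status pattern starts at position `j` of `l`. -/
def pvPat (l : List Char) (j : Nat) : Prop :=
  ['C', ')'] <+: l.drop j ∨ ['I', ')'] <+: l.drop j ∨ ['N', ')'] <+: l.drop j

lemma pvPat_zero (c d : Char) (t : List Char) :
    pvPat (c :: d :: t) 0 ↔ (c = 'C' ∨ c = 'I' ∨ c = 'N') ∧ d = ')' := by
  simp [pvPat, List.cons_prefix_cons]
  tauto

lemma pvPat_succ (c : Char) (t : List Char) (j : Nat) :
    pvPat (c :: t) (j + 1) ↔ pvPat t j := by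
  simp [pvPat]

lemma pvPat_short (l : List Char) (j : Nat) (h : l.length ≤ 1) : ¬ pvPat l j := by
  rintro (hp | hp | hp) <;>
    have := hp.length_le <;> simp at this <;> omega

lemma altGo_none : ∀ (l : List Char) (k : Nat), (∀ j, ¬ pvPat l j) → find_status_altGo l k = -1 := by
  intro l k h
  fun_induction find_status_altGo l k with
  | case1 c d t i hc =>
      exact absurd ((pvPat_zero c d t).2 hc) (h 0)
  | case2 c d t i hc ih =>
      exact ih (fun j => by have := h (j + 1); rwa [pvPat_succ] at this)
  | case3 => rfl

lemma altGo_least : ∀ (l : List Char) (k j : Nat), pvPat l j → (∀ i, i < j → ¬ pvPat l i) →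
    find_status_altGo l k = ((k + j : Nat) : Int) := by
  intro l k j hj hmin
  induction l generalizing k j with
  | nil => exact absurd hj (pvPat_short [] j (by simp))
  | cons c t ih =>
      cases t with
      | nil => exact absurd hj (pvPat_short [c] j (by simp))
      | cons d t' =>
          by_cases hc : (c = 'C' ∨ c = 'I' ∨ c = 'N') ∧ d = ')'
          · have hj0 : j = 0 := by
              by_contra hne
              exact hmin 0 (by omega) ((pvPat_zero c d t').2 hc)
            simp [find_status_altGo, hc, hj0]
          · have h0 : ¬ pvPat (c :: d :: t') 0 := fun hp => hc ((pvPat_zero c d t').1 hp)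
            obtain ⟨j', rfl⟩ : ∃ j', j = j' + 1 := by
              cases j with
              | zero => exact absurd hj h0
              | succ n => exact ⟨n, rfl⟩
            have hj' : pvPat (d :: t') j' := (pvPat_succ c (d :: t') j').1 hj
            have hmin' : ∀ i, i < j' → ¬ pvPat (d :: t') i := fun i hi hp =>
              hmin (i + 1) (by omega) ((pvPat_succ c (d :: t') i).2 hp)
            have := ih (k + 1) j' hj' hmin'
            simp only [find_status_altGo, if_neg hc, this]
            push_cast; ring

/-- `find` bounds from an occurrence at `j`. -/
lemma find_le_of_occ (l sub : List Char) (j : Nat) (hocc : sub <+: l.drop j) :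
    0 ≤ PySem.Chars.find l sub ∧ PySem.Chars.find l sub ≤ (j : Int) := by
  have hinf : sub <:+: l := hocc.isInfix.trans (l.drop_suffix j).isInfix
  have h0 : 0 ≤ PySem.Chars.find l sub := (PySem.Chars.find_nonneg_iff l sub).2 hinf
  obtain ⟨_, hlt⟩ := PySem.Chars.find_spec h0
  refine ⟨h0, ?_⟩
  by_contra hgt
  push Not at hgt
  have hjlt : j < (PySem.Chars.find l sub).toNat := by omega
  exact hlt j hjlt hocc

lemma find_occ_self (l sub : List Char) (h : 0 ≤ PySem.Chars.find l sub) :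
    sub <+: l.drop (PySem.Chars.find l sub).toNat :=
  (PySem.Chars.find_spec h).1

lemma find_neg_of_none (l sub : List Char) (h : ∀ j, ¬ sub <+: l.drop j) :
    PySem.Chars.find l sub = -1 := by
  refine (PySem.Chars.find_eq_neg_one_iff l sub).2 (fun hinf => ?_)
  have := (PySem.Chars.exists_prefix_drop_iff_isIn sub l).2
  obtain ⟨j, hj⟩ := (PySem.Chars.exists_prefix_drop_iff_isIn sub l).2
    ((PySem.Chars.isIn_iff_infix sub l).2 hinf)
  exact h j hj

-- ===== VERDICT (by name: the statement is the Claim_ definition above) =====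
theorem find_status_spec : Claim_equal_find_status := by
  intro s _
  unfold Spec_find_status find_status find_status_alt
  set l := s.toList with hl
  have hfe : ∀ c : Char, PySem.Str.find s (String.ofList [c, ')']) = PySem.Chars.find l [c, ')'] := by
    intro c; simp [PySem.Str.find_eq, hl, String.toList_ofList]
  simp only [List.foldl, hfe]
  set fC := PySem.Chars.find l ['C', ')'] with hfC
  set fI := PySem.Chars.find l ['I', ')'] with hfI
  set fN := PySem.Chars.find l ['N', ')'] with hfN
  by_cases hex : ∃ j, pvPat l j
  · haveI : DecidablePred (pvPat l) := fun j => by unfold pvPat; infer_instance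
    set j := Nat.find hex with hjdef
    have hj : pvPat l j := Nat.find_spec hex
    have hmin : ∀ i, i < j → ¬ pvPat l i := fun i hi => Nat.find_min hex hi
    -- each find is -1 or ≥ j
    have hbC : fC = -1 ∨ ((j : Int) ≤ fC ∧ fC ≤ l.length) := by
      by_cases h0 : 0 ≤ fC
      · right
        have hocc := find_occ_self l ['C', ')'] (hfC ▸ h0)
        have hp : pvPat l fC.toNat := Or.inl (hfC ▸ hocc)
        have := Nat.find_min' hex hp
        constructor
        · omega
        · exact hfC ▸ PySem.Chars.find_le_length l ['C', ')']
      · left; have := PySem.Chars.neg_one_le_find l ['C', ')']; omega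
    have hbI : fI = -1 ∨ ((j : Int) ≤ fI ∧ fI ≤ l.length) := by
      by_cases h0 : 0 ≤ fI
      · right
        have hocc := find_occ_self l ['I', ')'] (hfI ▸ h0)
        have hp : pvPat l fI.toNat := Or.inr (Or.inl (hfI ▸ hocc))
        have := Nat.find_min' hex hp
        constructor
        · omega
        · exact hfI ▸ PySem.Chars.find_le_length l ['I', ')']
      · left; have := PySem.Chars.neg_one_le_find l ['I', ')']; omega
    have hbN : fN = -1 ∨ ((j : Int) ≤ fN ∧ fN ≤ l.length) := by
      by_cases h0 : 0 ≤ fN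
      · right
        have hocc := find_occ_self l ['N', ')'] (hfN ▸ h0)
        have hp : pvPat l fN.toNat := Or.inr (Or.inr (hfN ▸ hocc))
        have := Nat.find_min' hex hp
        constructor
        · omega
        · exact hfN ▸ PySem.Chars.find_le_length l ['N', ')']
      · left; have := PySem.Chars.neg_one_le_find l ['N', ')']; omega
    -- one find equals j
    have hone : fC = (j : Int) ∨ fI = (j : Int) ∨ fN = (j : Int) := by
      rcases hj with hp | hp | hp
      · left
        have h := find_le_of_occ l ['C', ')'] j hp
        rcases hbC with h1 | h1 <;> omega
      · right; left
        have h := find_le_of_occ l ['I', ')'] j hp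
        rcases hbI with h1 | h1 <;> omega
      · right; right
        have h := find_le_of_occ l ['N', ')'] j hp
        rcases hbN with h1 | h1 <;> omega
    have hB : find_status_altGo l 0 = ((0 + j : Nat) : Int) := altGo_least l 0 j hj hmin
    rw [hB]
    split_ifs with h1 h2 h3 <;>
      simp_all [PySem.List.min?_id_cons, List.foldl] <;> omega
  · push Not at hex
    have hnC : fC = -1 := hfC ▸ find_neg_of_none l ['C', ')'] (fun j h => hex j (Or.inl h))
    have hnI : fI = -1 := hfI ▸ find_neg_of_none l ['I', ')'] (fun j h => hex j (Or.inr (Or.inl h)))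
    have hnN : fN = -1 := hfN ▸ find_neg_of_none l ['N', ')'] (fun j h => hex j (Or.inr (Or.inr h)))
    have hB : find_status_altGo l 0 = -1 := altGo_none l 0 hex
    simp [hnC, hnI, hnN, hB]
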